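-- pv_equiv track=rewrite | github.com/lugezz/repo_testing | greatest_2_letters_difference.py | find_any_letter_group_distance_2
-- ===== SOURCE A (Python) =====
-- from collections import defaultdict
--
-- def find_any_letter_group_distance_2(text: str) -> int:
--     """
--     Find the greatest distance between any two letters in a text.
--     It takes 2 letters groups and compares them to find the greatest distance.
--     taking into account the position of the letters in the text.
--     It returns -1 if no equal groups found.
--     """
--     greatest_distance = -1
--     dict_letters = defaultdict(lambda: -1)
--
--     for idx, letter in enumerate(text):
--         next_letter = text[idx:idx+2]
--         greatest_distance = max(greatest_distance, idx - dict_letters[next_letter])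
--         dict_letters[next_letter] = max(dict_letters[next_letter], idx)
--
--     return greatest_distance - 2
-- ===== SOURCE B (Python) =====
-- def find_any_letter_group_distance_2(text: str) -> int:
--     """
--     Find the greatest distance between any two letters in a text.
--     It takes 2 letters groups and compares them to find the greatest distance.
--     taking into account the position of the letters in the text.
--     It returns -1 if no equal groups found.
--     """
--     groups = {}
--     for idx in range(len(text)):
--         groups.setdefault(text[idx:idx + 2], []).append(idx)
--     best = -1
--     for idxs in groups.values():
--         prev = -1
--         for i in idxs:
--             best = max(best, i - prev)
--             prev = i
--     return best - 2
-- ===== Notes on version B (the rewrite author's own statement) =====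
-- stated objective: alternative
-- what changed: B replaces A's single incremental pass with a defaultdict of last positions by a two-phase algorithm: first build an index table mapping each 2-gram to the ordered list of its occurrence positions, then scan each group's index list for its largest consecutive gap (with a -1 sentinel) and fold those into a global maximum.
import Mathlib
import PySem

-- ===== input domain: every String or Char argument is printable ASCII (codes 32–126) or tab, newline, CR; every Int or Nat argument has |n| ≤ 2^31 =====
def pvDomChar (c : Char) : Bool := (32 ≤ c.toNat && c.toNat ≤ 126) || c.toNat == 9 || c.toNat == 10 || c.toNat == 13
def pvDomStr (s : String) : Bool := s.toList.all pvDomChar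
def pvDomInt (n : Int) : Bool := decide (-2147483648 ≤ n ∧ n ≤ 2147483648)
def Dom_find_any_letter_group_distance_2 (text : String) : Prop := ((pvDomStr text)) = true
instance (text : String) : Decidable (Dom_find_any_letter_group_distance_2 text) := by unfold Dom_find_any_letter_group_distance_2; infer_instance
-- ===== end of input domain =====

-- B builds a 2-gram -> occurrence-index table first and then scans each group for its
-- largest consecutive gap, instead of A's single pass over a defaultdict of last positions
-- (objective: alternative decomposition, same O(n) cost).

-- ===== PORT A =====
-- one loop step of A: p = (idx, letter); 'letter' is unused by A's body, exactly as in the Python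
def pvA_step (cs : List Char) (st : Int × PySem.Dict (List Char) Int) (p : Int × Char) :
    Int × PySem.Dict (List Char) Int :=
  let nl := PySem.List.slice cs (some p.1) (some (p.1 + 2))   -- next_letter = text[idx:idx+2]
  let prev := st.2.getD nl (-1)                                -- dict_letters[next_letter] (defaultdict -1)
  (max st.1 (p.1 - prev), st.2.insert nl (max prev p.1))

def find_any_letter_group_distance_2 (text : String) : Int :=
  ((PySem.List.enumerate text.toList).foldl (pvA_step text.toList)
      (-1, PySem.Dict.empty)).1 - 2

-- ===== PORT B =====
-- phase 1: groups.setdefault(text[idx:idx+2], []).append(idx)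
def pvB_build (cs : List Char) : PySem.Dict (List Char) (List Int) :=
  (PySem.List.pyRange 0 (cs.length : Int)).foldl
    (fun d idx => d.modify (PySem.List.slice cs (some idx) (some (idx + 2))) [] (· ++ [idx]))
    PySem.Dict.empty

-- phase 2, inner loop: prev = -1; for i in idxs: best = max(best, i - prev); prev = i
def pvB_groupMax (best : Int) (idxs : List Int) : Int :=
  (idxs.foldl (fun (st : Int × Int) i => (max st.1 (i - st.2), i)) (best, -1)).1

def find_any_letter_group_distance_2_alt (text : String) : Int :=
  ((pvB_build text.toList).values.foldl pvB_groupMax (-1)) - 2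

-- ===== PRECONDITION & SPEC =====
def Spec_find_any_letter_group_distance_2 (text : String) (out : Int) : Prop := out = find_any_letter_group_distance_2_alt text
instance (text : String) (out : Int) : Decidable (Spec_find_any_letter_group_distance_2 text out) := by unfold Spec_find_any_letter_group_distance_2; infer_instance

-- ===== CLAIM (what is proved, stated in full; the proofs are below) =====
def Claim_equal_find_any_letter_group_distance_2 : Prop := ∀ (text : String), Dom_find_any_letter_group_distance_2 text → Spec_find_any_letter_group_distance_2 text (find_any_letter_group_distance_2 text)

-- ===== LEMMAS AND PROOFS =====

-- the 2-gram at position i (both Pythons compute this same expression)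
def pvGram (cs : List Char) (i : Int) : List Char :=
  PySem.List.slice cs (some i) (some (i + 2))

-- A's loop step, as a function of the index only
def pvAI (cs : List Char) (st : Int × PySem.Dict (List Char) Int) (i : Int) :
    Int × PySem.Dict (List Char) Int :=
  let prev := st.2.getD (pvGram cs i) (-1)
  (max st.1 (i - prev), st.2.insert (pvGram cs i) (max prev i))

-- B's build step, as a function of the index only
def pvBI (cs : List Char) (d : PySem.Dict (List Char) (List Int)) (i : Int) :
    PySem.Dict (List Char) (List Int) :=
  d.modify (pvGram cs i) [] (· ++ [i])

def pvStA (cs : List Char) (n : Nat) : Int × PySem.Dict (List Char) Int :=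
  (List.range n).foldl (fun st (k : Nat) => pvAI cs st (k : Int)) (-1, PySem.Dict.empty)

def pvBld (cs : List Char) (n : Nat) : PySem.Dict (List Char) (List Int) :=
  (List.range n).foldl (fun d (k : Nat) => pvBI cs d (k : Int)) PySem.Dict.empty

def pvPh (d : PySem.Dict (List Char) (List Int)) : Int :=
  d.values.foldl pvB_groupMax (-1)

-- inner pair-fold: the second component is the last processed index
lemma pv_snd_fold (l : List Int) (b p : Int) :
    (l.foldl (fun (st : Int × Int) i => (max st.1 (i - st.2), i)) (b, p)).2 = l.getLastD p := by
  induction l generalizing b p with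
  | nil => rfl
  | cons x t ih => rw [List.foldl_cons, ih, List.getLastD_cons]

-- inner pair-fold: a max in the accumulator's first component commutes out
lemma pv_fst_fold_max (l : List Int) (a b p : Int) :
    (l.foldl (fun (st : Int × Int) i => (max st.1 (i - st.2), i)) (max a b, p)).1
      = max a (l.foldl (fun (st : Int × Int) i => (max st.1 (i - st.2), i)) (b, p)).1 := by
  induction l generalizing b p with
  | nil => rfl
  | cons x t ih => simpa [List.foldl_cons, max_assoc] using ih (max b (x - p)) x

lemma pv_groupMax_append (b : Int) (l : List Int) (n : Int) :
    pvB_groupMax b (l ++ [n]) = max (pvB_groupMax b l) (n - l.getLastD (-1)) := by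
  simp [pvB_groupMax, List.foldl_append, pv_snd_fold]

lemma pv_groupMax_max (a b : Int) (l : List Int) :
    pvB_groupMax (max a b) l = max a (pvB_groupMax b l) := by
  simp [pvB_groupMax, pv_fst_fold_max]

-- fold of pvB_groupMax over the groups of an items list: a max in the accumulator commutes out
lemma pv_gmFold_max (its : List (List Char × List Int)) (a b : Int) :
    its.foldl (fun b p => pvB_groupMax b p.2) (max a b)
      = max a (its.foldl (fun b p => pvB_groupMax b p.2) b) := by
  induction its generalizing b with
  | nil => rfl
  | cons v t ih => simpa [List.foldl_cons, pv_groupMax_max] using ih (pvB_groupMax b v.2)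

-- replacing the (unique) entry of key g by its value with n appended, at the items level
lemma pv_rep (g : List Char) (n : Int) (its : List (List Char × List Int)) (v : List Int) :
    ∀ b : Int, (its.map Prod.fst).Nodup → (g, v) ∈ its →
    (its.map (fun p => if p.1 == g then (g, v ++ [n]) else p)).foldl
        (fun b p => pvB_groupMax b p.2) b
      = max (its.foldl (fun b p => pvB_groupMax b p.2) b) (n - v.getLastD (-1)) := by
  induction its with
  | nil => intro b _ h; simp at h
  | cons hd rest ih =>
      intro b hnd hmem
      by_cases hkg : hd.1 = g
      · have hv : hd = (g, v) := by
          rcases List.mem_cons.mp hmem with h | h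
          · exact h.symm
          · exfalso
            have : g ∈ rest.map Prod.fst := List.mem_map.mpr ⟨(g, v), h, rfl⟩
            exact (List.nodup_cons.mp hnd).1 (hkg ▸ this)
        subst hv
        have hrest : rest.map (fun p => if p.1 == g then (g, v ++ [n]) else p) = rest := by
          conv_rhs => rw [← List.map_id rest]
          refine List.map_congr_left fun p hp => ?_
          have : p.1 ≠ g := by
            intro h
            exact (List.nodup_cons.mp hnd).1 (h ▸ List.mem_map.mpr ⟨p, hp, rfl⟩)
          simp [this]
        simp only [List.map_cons, List.foldl_cons, hrest]
        simp only [show ((g, v).1 == g) = true by simp, if_pos]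
        rw [pv_groupMax_append, max_comm (pvB_groupMax b v), pv_gmFold_max, max_comm]
      · have hhd : (if hd.1 == g then (g, v ++ [n]) else hd) = hd := by simp [hkg]
        have hmem' : (g, v) ∈ rest := by
          rcases List.mem_cons.mp hmem with h | h
          · exact absurd (congrArg Prod.fst h.symm) hkg
          · exact h
        simp only [List.map_cons, List.foldl_cons, hhd]
        exact ih (pvB_groupMax b hd.2) (List.nodup_cons.mp hnd).2 hmem'

-- phase-2 value of the table after one build step
lemma pv_ph_step (cs : List Char) (d : PySem.Dict (List Char) (List Int)) (i : Int)
    (hnd : d.keys.Nodup) :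
    pvPh (pvBI cs d i) = max (pvPh d) (i - (d.getD (pvGram cs i) []).getLastD (-1)) := by
  have hmod : pvBI cs d i = d.insert (pvGram cs i) (d.getD (pvGram cs i) [] ++ [i]) := rfl
  have hvals : ∀ e : PySem.Dict (List Char) (List Int), pvPh e = e.items.foldl (fun b p => pvB_groupMax b p.2) (-1) := by
    intro e
    rw [pvPh, show e.values = e.items.map (fun p => p.2) from rfl, List.foldl_map]
  by_cases hc : d.contains (pvGram cs i) = true
  · obtain ⟨v, hv⟩ : ∃ v, d.get? (pvGram cs i) = some v := by
      rw [PySem.Dict.contains_eq_isSome_get?] at hc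
      exact Option.isSome_iff_exists.mp hc
    have hgetD : d.getD (pvGram cs i) [] = v := PySem.Dict.getD_of_get?_eq_some d [] hv
    rw [hmod, hvals, hvals, PySem.Dict.items_insert_of_contains d _ hc, hgetD]
    exact pv_rep (pvGram cs i) i d.items v (-1) hnd (PySem.Dict.mem_items_of_get?_eq_some d hv)
  · have hc' : d.contains (pvGram cs i) = false := by simpa using hc
    have hgetD : d.getD (pvGram cs i) [] = [] := PySem.Dict.getD_of_not_contains d [] hc'
    rw [hmod, hvals, hvals, PySem.Dict.items_insert_of_not_contains d _ hc', List.foldl_append, hgetD]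
    simp [pvB_groupMax]

-- the joint loop invariant
lemma pv_inv (cs : List Char) (n : Nat) :
    (pvStA cs n).1 = pvPh (pvBld cs n)
    ∧ (∀ g, (pvStA cs n).2.getD g (-1) = ((pvBld cs n).getD g []).getLastD (-1))
    ∧ (∀ g, ((pvBld cs n).getD g []).getLastD (-1) < (n : Int))
    ∧ (pvBld cs n).keys.Nodup := by
  induction n with
  | zero =>
      refine ⟨rfl, fun g => rfl, fun g => by simp [pvBld, PySem.Dict.getD_empty], by simp [pvBld, PySem.Dict.keys_empty]⟩
  | succ n ih =>
      obtain ⟨ih1, ih2, ih3, ih4⟩ := ih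
      have hA : pvStA cs (n + 1) = pvAI cs (pvStA cs n) (n : Int) := by
        rw [pvStA, pvStA, List.range_succ, List.foldl_append, List.foldl_cons, List.foldl_nil]
      have hB : pvBld cs (n + 1) = pvBI cs (pvBld cs n) (n : Int) := by
        rw [pvBld, pvBld, List.range_succ, List.foldl_append, List.foldl_cons, List.foldl_nil]
      have hprev : (pvStA cs n).2.getD (pvGram cs (n : Int)) (-1)
          = ((pvBld cs n).getD (pvGram cs (n : Int)) []).getLastD (-1) := ih2 _
      have hgetD : ∀ g, (pvBld cs (n + 1)).getD g []
          = if g = pvGram cs (n : Int) then (pvBld cs n).getD (pvGram cs (n : Int)) [] ++ [(n : Int)]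
            else (pvBld cs n).getD g [] := by
        intro g
        rw [hB, show pvBI cs (pvBld cs n) (n : Int)
              = (pvBld cs n).modify (pvGram cs (n : Int)) [] (· ++ [(n : Int)]) from rfl,
          PySem.Dict.getD_modify]
      refine ⟨?_, ?_, ?_, ?_⟩
      · rw [hA, hB, pv_ph_step cs _ _ ih4]
        show max (pvStA cs n).1 ((n : Int) - _) = _
        rw [ih1, hprev]
      · intro g
        rw [hgetD g, hA]
        show ((pvStA cs n).2.insert (pvGram cs (n : Int)) (max _ (n : Int))).getD g (-1) = _
        rw [PySem.Dict.getD_insert]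
        by_cases hg : g = pvGram cs (n : Int)
        · rw [if_pos hg, if_pos hg, List.getLastD_concat, hprev]
          have := ih3 (pvGram cs (n : Int))
          omega
        · rw [if_neg hg, if_neg hg]
          exact ih2 g
      · intro g
        rw [hgetD g]
        by_cases hg : g = pvGram cs (n : Int)
        · rw [if_pos hg, List.getLastD_concat]
          push_cast; omega
        · rw [if_neg hg]
          have := ih3 g
          push_cast at *; omega
      · rw [hB]
        show ((pvBld cs n).modify (pvGram cs (n : Int)) [] (· ++ [(n : Int)])).keys.Nodup
        rw [PySem.Dict.keys_modify]
        by_cases hc : (pvBld cs n).contains (pvGram cs (n : Int)) = true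
        · rw [PySem.Dict.keys_insert_of_contains _ _ hc]
          exact ih4
        · have hc' : (pvBld cs n).contains (pvGram cs (n : Int)) = false := by simpa using hc
          rw [PySem.Dict.keys_insert_of_not_contains _ _ hc']
          have hnm : pvGram cs (n : Int) ∉ (pvBld cs n).keys := by
            rw [PySem.Dict.contains_eq_decide_mem_keys] at hc'
            simpa using hc'
          simp [List.nodup_append, ih4]
          exact fun a ha h => hnm (h ▸ ha)

lemma pv_A_eq (cs : List Char) :
    ((PySem.List.enumerate cs).foldl (pvA_step cs) (-1, PySem.Dict.empty)).1 = (pvStA cs cs.length).1 := by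
  have hstep : pvA_step cs = fun st p => pvAI cs st p.1 := rfl
  have hlen : (0 : Int) + cs.length = (cs.length : Int) := by ring
  rw [hstep, ← List.foldl_map, PySem.List.map_fst_enumerate, hlen,
    PySem.List.pyRange_zero_natCast, List.foldl_map, pvStA]

lemma pv_B_eq (cs : List Char) :
    (pvB_build cs).values.foldl pvB_groupMax (-1) = pvPh (pvBld cs cs.length) := by
  unfold pvB_build pvPh pvBld
  rw [PySem.List.pyRange_zero_natCast, List.foldl_map]
  rfl

-- ===== VERDICT (by name: the statement is the Claim_ definition above) =====
theorem find_any_letter_group_distance_2_spec : Claim_equal_find_any_letter_group_distance_2 := by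
  intro text _
  unfold Spec_find_any_letter_group_distance_2 find_any_letter_group_distance_2 find_any_letter_group_distance_2_alt
  rw [pv_A_eq, pv_B_eq, (pv_inv text.toList text.toList.length).1]
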